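-- pv_equiv track=rewrite | github.com/HeMoreira/Crazy-Chess | main.py | descobrirPosicao
-- ===== SOURCE A (Python) =====
-- conversao_coluna = {"a":1,"b":2,"c":3,"d":4,"e":5,"f":6,"g":7,"h":8}
--
-- def descobrirPosicao(coordenadas):
--     cord_y = 1000
--     for chave, valor in conversao_coluna.items():
--         if chave == coordenadas[0]:
--             cord_y = valor
--     if cord_y == 1000:
--         return -1, -1
--     cord_x = 100
--     if coordenadas[1] in "12345678":
--         cord_x = int(coordenadas[1])
--     else:
--         return -1, -1
--     pos1 = 8-(cord_x)
--     pos2 = cord_y-1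
--     return pos1, pos2
-- ===== SOURCE B (Python) =====
-- def descobrirPosicao(coordenadas):
--     col = coordenadas[0]
--     if not ('a' <= col <= 'h'):
--         return -1, -1
--     row = coordenadas[1]
--     if not ('1' <= row <= '8'):
--         return -1, -1
--     return 8 - (ord(row) - ord('0')), ord(col) - ord('a')
-- ===== Notes on version B (the rewrite author's own statement) =====
-- stated objective: idiomatic
-- what changed: Replaced the dictionary scan (iterate all 8 items, last match wins) with a direct closed-form character-code computation: column = ord(c)-ord('a') after a range check 'a'<=c<='h', rank via '1'<=d<='8' and ord arithmetic instead of substring membership plus int().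
import Mathlib
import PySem

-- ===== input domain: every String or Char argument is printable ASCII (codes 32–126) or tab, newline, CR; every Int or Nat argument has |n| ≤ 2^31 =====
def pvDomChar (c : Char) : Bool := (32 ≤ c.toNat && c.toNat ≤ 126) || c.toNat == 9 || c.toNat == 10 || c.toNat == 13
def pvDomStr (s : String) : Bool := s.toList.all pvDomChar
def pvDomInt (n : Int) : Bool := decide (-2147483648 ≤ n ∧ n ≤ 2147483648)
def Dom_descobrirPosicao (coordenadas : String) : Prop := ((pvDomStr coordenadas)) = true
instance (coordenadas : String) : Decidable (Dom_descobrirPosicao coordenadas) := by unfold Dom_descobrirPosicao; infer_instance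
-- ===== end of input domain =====

-- B replaces A's dictionary scan with closed-form ord() arithmetic on the two characters (idiomatic, same cost).

-- ===== PORT A =====
-- conversao_coluna.items(), in insertion order
def convItems : List (Char × Int) :=
  [('a',1),('b',2),('c',3),('d',4),('e',5),('f',6),('g',7),('h',8)]

def descobrirPosicao (coordenadas : String) : Int × Int :=
  match PySem.Str.pyGet? coordenadas 0 with
  | none => (0, 0)  -- IndexError; excluded by Pre_
  | some c0 =>
    let cord_y : Int := convItems.foldl (fun acc kv => if kv.1 == c0 then kv.2 else acc) 1000
    if cord_y == 1000 then (-1, -1)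
    else
      match PySem.Str.pyGet? coordenadas 1 with
      | none => (0, 0)  -- IndexError; excluded by Pre_
      | some c1 =>
        if PySem.Str.isIn (String.ofList [c1]) "12345678" then
          let cord_x : Int := (PySem.Int.ofStr? (String.ofList [c1])).getD 0  -- int(); always a digit here so never none
          (8 - cord_x, cord_y - 1)
        else (-1, -1)

-- ===== PORT B =====
def descobrirPosicao_alt (coordenadas : String) : Int × Int :=
  match PySem.Str.pyGet? coordenadas 0 with
  | none => (0, 0)  -- IndexError; excluded by Pre_
  | some col =>
    if 'a' ≤ col ∧ col ≤ 'h' then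
      match PySem.Str.pyGet? coordenadas 1 with
      | none => (0, 0)  -- IndexError; excluded by Pre_
      | some row =>
        if '1' ≤ row ∧ row ≤ '8' then
          (8 - ((row.toNat : Int) - ('0'.toNat : Int)), (col.toNat : Int) - ('a'.toNat : Int))
        else (-1, -1)
    else (-1, -1)

-- ===== PRECONDITION & SPEC =====
-- Pre_ excludes exactly the inputs where Python A raises IndexError: the empty string,
-- and one-character strings whose single character is a valid column letter 'a'..'h'.
def Pre_descobrirPosicao (coordenadas : String) : Prop :=
  coordenadas.toList ≠ [] ∧
  (('a' ≤ coordenadas.toList.headD ' ' ∧ coordenadas.toList.headD ' ' ≤ 'h') →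
    2 ≤ coordenadas.toList.length)
instance (coordenadas : String) : Decidable (Pre_descobrirPosicao coordenadas) := by
  unfold Pre_descobrirPosicao; infer_instance

def pvWitness_descobrirPosicao : String := "e2"

def Spec_descobrirPosicao (coordenadas : String) (out : Int × Int) : Prop := out = descobrirPosicao_alt coordenadas
instance (coordenadas : String) (out : Int × Int) : Decidable (Spec_descobrirPosicao coordenadas out) := by unfold Spec_descobrirPosicao; infer_instance

-- ===== CLAIM (what is proved, stated in full; the proofs are below) =====
def Claim_equal_descobrirPosicao : Prop := ∀ (coordenadas : String), Dom_descobrirPosicao coordenadas → Pre_descobrirPosicao coordenadas → Spec_descobrirPosicao coordenadas (descobrirPosicao coordenadas)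

-- ===== LEMMAS AND PROOFS =====

theorem char_toNat_inj {c d : Char} (h : c.toNat = d.toNat) : c = d := by
  apply Char.ext; exact UInt32.toNat_inj.mp h

theorem letter_cases (c : Char) (h1 : ('a':Char) ≤ c) (h2 : c ≤ 'h') :
    c = 'a' ∨ c = 'b' ∨ c = 'c' ∨ c = 'd' ∨ c = 'e' ∨ c = 'f' ∨ c = 'g' ∨ c = 'h' := by
  have l1 : (97:Nat) ≤ c.toNat := h1
  have l2 : c.toNat ≤ 104 := h2
  rcases (by omega : c.toNat = 97 ∨ c.toNat = 98 ∨ c.toNat = 99 ∨ c.toNat = 100 ∨ c.toNat = 101 ∨ c.toNat = 102 ∨ c.toNat = 103 ∨ c.toNat = 104) with h|h|h|h|h|h|h|h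
  · exact Or.inl (char_toNat_inj h)
  · exact Or.inr (Or.inl (char_toNat_inj h))
  · exact Or.inr (Or.inr (Or.inl (char_toNat_inj h)))
  · exact Or.inr (Or.inr (Or.inr (Or.inl (char_toNat_inj h))))
  · exact Or.inr (Or.inr (Or.inr (Or.inr (Or.inl (char_toNat_inj h)))))
  · exact Or.inr (Or.inr (Or.inr (Or.inr (Or.inr (Or.inl (char_toNat_inj h))))))
  · exact Or.inr (Or.inr (Or.inr (Or.inr (Or.inr (Or.inr (Or.inl (char_toNat_inj h)))))))
  · exact Or.inr (Or.inr (Or.inr (Or.inr (Or.inr (Or.inr (Or.inr (char_toNat_inj h)))))))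

theorem digit_cases (c : Char) (h1 : ('1':Char) ≤ c) (h2 : c ≤ '8') :
    c = '1' ∨ c = '2' ∨ c = '3' ∨ c = '4' ∨ c = '5' ∨ c = '6' ∨ c = '7' ∨ c = '8' := by
  have l1 : (49:Nat) ≤ c.toNat := h1
  have l2 : c.toNat ≤ 56 := h2
  rcases (by omega : c.toNat = 49 ∨ c.toNat = 50 ∨ c.toNat = 51 ∨ c.toNat = 52 ∨ c.toNat = 53 ∨ c.toNat = 54 ∨ c.toNat = 55 ∨ c.toNat = 56) with h|h|h|h|h|h|h|h
  · exact Or.inl (char_toNat_inj h)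
  · exact Or.inr (Or.inl (char_toNat_inj h))
  · exact Or.inr (Or.inr (Or.inl (char_toNat_inj h)))
  · exact Or.inr (Or.inr (Or.inr (Or.inl (char_toNat_inj h))))
  · exact Or.inr (Or.inr (Or.inr (Or.inr (Or.inl (char_toNat_inj h)))))
  · exact Or.inr (Or.inr (Or.inr (Or.inr (Or.inr (Or.inl (char_toNat_inj h))))))
  · exact Or.inr (Or.inr (Or.inr (Or.inr (Or.inr (Or.inr (Or.inl (char_toNat_inj h)))))))
  · exact Or.inr (Or.inr (Or.inr (Or.inr (Or.inr (Or.inr (Or.inr (char_toNat_inj h)))))))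

theorem fold_not_found (c : Char) (h : ¬(('a':Char) ≤ c ∧ c ≤ 'h')) :
    convItems.foldl (fun acc kv => if kv.1 == c then kv.2 else acc) (1000:Int) = 1000 := by
  simp only [convItems, List.foldl, beq_iff_eq]
  split_ifs with h1 h2 h3 h4 h5 h6 h7 h8 <;>
    first
    | rfl
    | (exfalso; apply h; first
        | (rw [← h1]; exact ⟨by decide, by decide⟩)
        | (rw [← h2]; exact ⟨by decide, by decide⟩)
        | (rw [← h3]; exact ⟨by decide, by decide⟩)
        | (rw [← h4]; exact ⟨by decide, by decide⟩)
        | (rw [← h5]; exact ⟨by decide, by decide⟩)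
        | (rw [← h6]; exact ⟨by decide, by decide⟩)
        | (rw [← h7]; exact ⟨by decide, by decide⟩)
        | (rw [← h8]; exact ⟨by decide, by decide⟩))

theorem isIn_single (d : Char) :
    PySem.Str.isIn (String.ofList [d]) "12345678" = true ↔ d ∈ ['1','2','3','4','5','6','7','8'] := by
  rw [PySem.Str.isIn_iff_infix]
  have hto : (String.ofList [d]).toList = [d] := by simp
  rw [hto]
  constructor
  · intro h
    have := h.subset (l₁ := [d])
    exact this (by simp)
  · intro h
    obtain ⟨l1, l2, hl⟩ := List.append_of_mem h
    exact ⟨l1, l2, by simpa using hl.symm⟩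

-- ===== VERDICT (by name: the statement is the Claim_ definition above) =====
theorem descobrirPosicao_spec : Claim_equal_descobrirPosicao := by
  intro s _ hpre
  unfold Spec_descobrirPosicao
  obtain ⟨hne, hlen⟩ := hpre
  rcases hs : s.toList with _ | ⟨c, tl⟩
  · exact absurd hs hne
  · have h0 : PySem.List.pyGet? s.toList 0 = some c := by
      rw [hs]; simp [PySem.List.pyGet?, PySem.List.pyIdx?]
    by_cases hc : ('a':Char) ≤ c ∧ c ≤ 'h'
    · have h2 : 2 ≤ s.toList.length := hlen (by rw [hs]; simpa using hc)
      rcases tl with _ | ⟨d, rest⟩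
      · rw [hs] at h2; simp at h2
      · have h1 : PySem.List.pyGet? s.toList 1 = some d := by
          rw [hs]; simp [PySem.List.pyGet?, PySem.List.pyIdx?]
        by_cases hd : ('1':Char) ≤ d ∧ d ≤ '8'
        · rcases letter_cases c hc.1 hc.2 with rfl|rfl|rfl|rfl|rfl|rfl|rfl|rfl <;>
          rcases digit_cases d hd.1 hd.2 with rfl|rfl|rfl|rfl|rfl|rfl|rfl|rfl <;>
          simp [descobrirPosicao, descobrirPosicao_alt, h0, h1] <;> decide
        · have hmem : d ∉ (['1','2','3','4','5','6','7','8'] : List Char) := by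
            intro hm
            apply hd
            fin_cases hm <;> exact ⟨by decide, by decide⟩
          have hisIn0 : PySem.Str.isIn (String.ofList [d]) "12345678" = false := by
            rw [← Bool.not_eq_true, isIn_single]; exact hmem
          have hisIn : PySem.Chars.isIn [d] ['1','2','3','4','5','6','7','8'] = false := by
            simpa using hisIn0
          rcases letter_cases c hc.1 hc.2 with rfl|rfl|rfl|rfl|rfl|rfl|rfl|rfl <;>
            simp [descobrirPosicao, descobrirPosicao_alt, h0, h1, hisIn, hd]
    · have hfold := fold_not_found c hc
      simp only [beq_iff_eq] at hfold
      simp [descobrirPosicao, descobrirPosicao_alt, h0, hc, hfold]
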